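-- pv_equiv track=rewrite | github.com/KavindaDulhan/Cyber-Attack-Implementation | crypto.py | candidate_dict_generator
-- ===== SOURCE A (Python) =====
-- def get_candidate_dict(counter, words, suffix):
--     lw = len(words)
--     if counter < lw:
--         return words[counter]
--     c = counter - lw
--     widx = c % lw
--     sidx = int(c / lw)
--     return words[widx] + suffix[sidx]
--
-- def candidate_dict_generator(words, suffix):
--     counter = 0
--     lw = len(words)
--     lc = len(suffix)
--
--     ## TODO ##
--     ## Insert your code here
--     ## hint: use get_candidate_dict()
--     candidate_count = lw + lw*lc            # Because we guess passwords of the form w or w||s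
--     for counter in range(candidate_count):  # Counter can get numbers between 0 to cadidate_count-1
--         yield get_candidate_dict(counter, words, suffix)
--     else:
--         return
-- ===== SOURCE B (Python) =====
-- def candidate_dict_generator(words, suffix):
--     # Nested iteration: plain words first, then suffix-outer / word-inner
--     # combinations, exactly the order the indexed loop in A produces.
--     for w in words:
--         yield w
--     for s in suffix:
--         for w in words:
--             yield w + s
-- ===== Notes on version B (the rewrite author's own statement) =====
-- stated objective: simpler
-- what changed: Replaced the flat counter loop over range(lw+lw*lc) with its per-item div/mod index decoding by two direct nested loops (words, then suffix x words), removing get_candidate_dict entirely.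
import Mathlib
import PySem

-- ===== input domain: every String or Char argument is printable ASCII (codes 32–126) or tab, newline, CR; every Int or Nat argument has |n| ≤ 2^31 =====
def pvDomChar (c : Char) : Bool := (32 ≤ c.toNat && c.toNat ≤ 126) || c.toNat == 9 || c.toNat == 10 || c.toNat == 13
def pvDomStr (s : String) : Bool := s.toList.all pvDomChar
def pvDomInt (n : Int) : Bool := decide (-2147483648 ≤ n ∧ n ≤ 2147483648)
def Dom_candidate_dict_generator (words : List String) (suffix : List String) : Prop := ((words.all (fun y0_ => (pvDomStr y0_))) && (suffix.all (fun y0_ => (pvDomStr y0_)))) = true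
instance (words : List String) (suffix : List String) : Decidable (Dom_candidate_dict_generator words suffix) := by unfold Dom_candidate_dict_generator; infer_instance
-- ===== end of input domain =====

-- B replaces the flat counter loop with div/mod index decoding by two direct
-- nested loops (words first, then suffix-outer/word-inner); same output, simpler.

-- ===== PORT A =====
-- indices are always in range when this is reached (counter < lw + lw*lc), so
-- pyGetD with "" is exact here (Python's IndexError path is unreachable)
def get_candidate_dict (counter : Int) (words : List String) (suffix : List String) : String :=
  let lw : Int := words.length
  if counter < lw then
    PySem.List.pyGetD words counter ""
  else
    let c := counter - lw
    let widx := PySem.Int.mod c lw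
    -- int(c / lw): c ≥ 0 and lw > 0 on every reached input, so truncation = floor
    let sidx := PySem.Int.floordiv c lw
    PySem.List.pyGetD words widx "" ++ PySem.List.pyGetD suffix sidx ""

def candidate_dict_generator (words : List String) (suffix : List String) : List String :=
  let lw : Int := words.length
  let lc : Int := suffix.length
  let candidate_count := lw + lw * lc
  (PySem.List.pyRange 0 candidate_count 1).foldl
    (fun acc counter => acc ++ [get_candidate_dict counter words suffix]) []

-- ===== PORT B =====
def candidate_dict_generator_alt (words : List String) (suffix : List String) : List String :=
  words ++ suffix.flatMap (fun s => words.map (fun w => w ++ s))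

-- ===== PRECONDITION & SPEC =====
def Spec_candidate_dict_generator (words : List String) (suffix : List String) (out : List String) : Prop := out = candidate_dict_generator_alt words suffix
instance (words : List String) (suffix : List String) (out : List String) : Decidable (Spec_candidate_dict_generator words suffix out) := by unfold Spec_candidate_dict_generator; infer_instance

-- ===== CLAIM (what is proved, stated in full; the proofs are below) =====
def Claim_equal_candidate_dict_generator : Prop := ∀ (words : List String) (suffix : List String), Dom_candidate_dict_generator words suffix → Spec_candidate_dict_generator words suffix (candidate_dict_generator words suffix)

-- ===== LEMMAS AND PROOFS =====

-- reading a list back by indices gives the list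
theorem map_range_getD {α : Type} (xs : List α) (d : α) :
    (List.range xs.length).map (fun i => xs.getD i d) = xs := by
  apply List.ext_getElem
  · simp
  · intro i h1 h2
    simp [List.getD_eq_getElem?_getD, List.getElem?_eq_getElem h2]

-- flatMap over a list = flatMap over its index range
theorem flatMap_eq_range_flatMap {α β : Type} (xs : List α) (d : α) (f : α → List β) :
    xs.flatMap f = (List.range xs.length).flatMap (fun i => f (xs.getD i d)) := by
  conv_lhs => rw [← map_range_getD xs d]
  rw [List.flatMap_map]

-- block decomposition of a product range
theorem range_mul_map {β : Type} (n m : Nat) (F : Nat → Nat → β) :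
    (List.range (n * m)).map (fun j => F (j % n) (j / n)) =
      (List.range m).flatMap (fun s => (List.range n).map (fun w => F w s)) := by
  induction m with
  | zero => simp
  | succ m ih =>
    rw [show List.range (m + 1) = List.range m ++ [m] from by simp [List.range_succ],
        List.flatMap_append, ← ih, Nat.mul_succ, List.range_add, List.map_append]
    congr 1
    simp only [List.flatMap_cons, List.flatMap_nil, List.append_nil, List.map_map]
    apply List.map_congr_left
    intro w hw
    have hwn : w < n := List.mem_range.mp hw
    have hnpos : 0 < n := by omega
    have h2 : (n * m + w) / n = m := by
      rw [Nat.mul_add_div hnpos, Nat.div_eq_of_lt hwn]; omega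
    simp [Nat.mod_eq_of_lt hwn, h2]

theorem ports_eq (words suffix : List String) :
    candidate_dict_generator words suffix = candidate_dict_generator_alt words suffix := by
  rcases words with _ | ⟨w0, ws⟩
  · simp [candidate_dict_generator, candidate_dict_generator_alt]
  set words := w0 :: ws with hwords
  set n := words.length with hn
  set m := suffix.length with hm
  have hnpos : 0 < n := by simp [hn, hwords]
  unfold candidate_dict_generator candidate_dict_generator_alt
  rw [PySem.List.foldl_append_singleton_eq_map, List.nil_append]
  have hcast : ((n : Int) + (n : Int) * (m : Int) - 0).toNat = n + n * m := by
    push_cast; omega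
  rw [PySem.List.pyRange_one, hcast, List.map_map]
  rw [List.range_add, List.map_append]
  congr 1
  · -- first block: plain words
    conv_rhs => rw [← map_range_getD words ""]
    apply List.map_congr_left
    intro k hk
    have hkn : k < n := List.mem_range.mp hk
    simp only [Function.comp_apply, get_candidate_dict]
    rw [if_pos (by push_cast; omega)]
    simp [PySem.List.pyGetD_natCast]
  · -- second block: suffix-outer / word-inner
    have hinner : ∀ s, words.map (fun w => w ++ s) =
        (List.range n).map (fun w => words.getD w "" ++ s) := by
      intro s
      conv_lhs => rw [← map_range_getD words ""]
      rw [List.map_map]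
      rfl
    rw [flatMap_eq_range_flatMap suffix "", ← hm]
    rw [show (fun i => words.map (fun w => w ++ suffix.getD i "")) =
        (fun i => (List.range n).map (fun w => words.getD w "" ++ suffix.getD i "")) from
      funext fun s => hinner _]
    rw [← range_mul_map n m (fun w s => words.getD w "" ++ suffix.getD s "")]
    simp only [List.map_map]
    apply List.map_congr_left
    intro j hj
    have hjm : j < n * m := List.mem_range.mp hj
    simp only [Function.comp_apply, get_candidate_dict]
    rw [if_neg (by omega)]
    have hc : ((0 : Int) + ↑(n + j)) - ↑n = (j : Int) := by omega
    rw [← hn, hc]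
    rw [show ((n : Int)) = ((n : Nat) : Int) from rfl]
    rw [PySem.Int.mod_natCast, PySem.Int.floordiv_natCast,
        PySem.List.pyGetD_natCast, PySem.List.pyGetD_natCast]

-- ===== VERDICT (by name: the statement is the Claim_ definition above) =====
theorem candidate_dict_generator_spec : Claim_equal_candidate_dict_generator := by
  intro words suffix _
  exact ports_eq words suffix
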